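-- pv_equiv track=rewrite | github.com/felipexrn/ceit_2022 | problema01.py | ultima_parada
-- ===== SOURCE A (Python) =====
-- def ultima_parada(combustivel,consumo,postos_de_gasolina):
--   pass
--   alcance = combustivel * consumo
--   posto = -1
--   postos_de_gasolina.sort()
--   if postos_de_gasolina[-1] <= alcance:
--     posto = postos_de_gasolina[-1]
--   elif postos_de_gasolina[0] > alcance:
--     posto = -1
--   else:
--     for i in range(len(postos_de_gasolina)):
--       if postos_de_gasolina[i] > alcance:
--         posto = postos_de_gasolina[i-1]
--         break
--   return posto
-- ===== SOURCE B (Python) =====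
-- def ultima_parada(combustivel, consumo, postos_de_gasolina):
--     # Sorts the list in place like the original; returns the rightmost station
--     # within reach via hand-written binary search instead of a linear scan.
--     postos_de_gasolina.sort()
--     alcance = combustivel * consumo
--     lo, hi = 0, len(postos_de_gasolina)
--     while lo < hi:
--         mid = (lo + hi) // 2
--         if postos_de_gasolina[mid] <= alcance:
--             lo = mid + 1
--         else:
--             hi = mid
--     return postos_de_gasolina[lo - 1] if lo else -1
-- ===== Notes on version B (the rewrite author's own statement) =====
-- stated objective: alternative
-- what changed: Replaces A's three-way branch (last element, first element, linear left-to-right scan for the first station out of range) with a single hand-written binary search for the rightmost station <= alcance after the same in-place sort.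
import Mathlib
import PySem

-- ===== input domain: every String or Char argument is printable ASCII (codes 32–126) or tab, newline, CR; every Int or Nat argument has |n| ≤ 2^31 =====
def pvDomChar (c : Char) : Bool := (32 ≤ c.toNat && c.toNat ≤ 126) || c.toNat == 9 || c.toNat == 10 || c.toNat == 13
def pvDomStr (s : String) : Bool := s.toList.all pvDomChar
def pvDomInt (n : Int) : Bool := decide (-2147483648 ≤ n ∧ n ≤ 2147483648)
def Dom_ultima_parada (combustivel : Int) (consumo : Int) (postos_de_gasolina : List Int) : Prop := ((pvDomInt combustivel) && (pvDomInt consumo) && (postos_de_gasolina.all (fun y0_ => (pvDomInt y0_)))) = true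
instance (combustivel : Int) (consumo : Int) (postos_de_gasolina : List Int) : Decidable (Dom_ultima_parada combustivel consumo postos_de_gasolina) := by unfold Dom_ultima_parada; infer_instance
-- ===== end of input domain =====

-- B replaces A's three-way branch + linear scan with one binary search for the
-- rightmost station ≤ alcance (alternative decomposition, same sort cost).
-- Both Pythons sort the argument list IN PLACE; the equivalence proved here is
-- about the return value only.

-- ===== PORT A =====
-- the 'for i in range(len(s)): if s[i] > alcance: posto = s[i-1]; break' loop
def ultima_parada_loop (s : List Int) (alcance : Int) (idxs : List Int) (posto : Int) : Int :=
  match idxs with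
  | [] => posto
  | i :: rest =>
    if (PySem.List.pyGet? s i).getD 0 > alcance then
      (PySem.List.pyGet? s (i - 1)).getD 0
    else ultima_parada_loop s alcance rest posto

def ultima_parada (combustivel : Int) (consumo : Int) (postos_de_gasolina : List Int) : Int :=
  let alcance := combustivel * consumo
  let posto : Int := -1
  let s := PySem.List.sorted postos_de_gasolina (fun x => x) false
  -- s[-1] / s[0] raise IndexError on an empty list: excluded by Pre_ (getD 0 is never used inside Pre_)
  if (PySem.List.pyGet? s (-1)).getD 0 ≤ alcance then
    (PySem.List.pyGet? s (-1)).getD 0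
  else if (PySem.List.pyGet? s 0).getD 0 > alcance then
    posto
  else
    ultima_parada_loop s alcance (PySem.List.pyRange 0 s.length 1) posto

-- ===== PORT B =====
-- the 'while lo < hi' binary-search loop of Source B
def ultima_parada_bs (s : List Int) (alcance : Int) (lo hi : Nat) : Nat :=
  if h : lo < hi then
    let mid := (lo + hi) / 2
    if (PySem.List.pyGet? s (mid : Int)).getD 0 ≤ alcance then
      ultima_parada_bs s alcance (mid + 1) hi
    else
      ultima_parada_bs s alcance lo mid
  else lo
termination_by hi - lo
decreasing_by all_goals omega

def ultima_parada_alt (combustivel : Int) (consumo : Int) (postos_de_gasolina : List Int) : Int :=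
  let s := PySem.List.sorted postos_de_gasolina (fun x => x) false
  let alcance := combustivel * consumo
  let lo := ultima_parada_bs s alcance 0 s.length
  if lo ≠ 0 then (PySem.List.pyGet? s ((lo : Int) - 1)).getD 0 else -1

-- ===== PRECONDITION & SPEC =====
-- A indexes postos_de_gasolina[-1]: Pre_ excludes exactly the empty list, on which A raises IndexError.
def Pre_ultima_parada (combustivel : Int) (consumo : Int) (postos_de_gasolina : List Int) : Prop :=
  postos_de_gasolina ≠ []
instance (combustivel : Int) (consumo : Int) (postos_de_gasolina : List Int) : Decidable (Pre_ultima_parada combustivel consumo postos_de_gasolina) := by unfold Pre_ultima_parada; infer_instance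

def pvWitness_ultima_parada : Int × Int × List Int := (3, 2, [10, 4, 7, 1])

def Spec_ultima_parada (combustivel : Int) (consumo : Int) (postos_de_gasolina : List Int) (out : Int) : Prop := out = ultima_parada_alt combustivel consumo postos_de_gasolina
instance (combustivel : Int) (consumo : Int) (postos_de_gasolina : List Int) (out : Int) : Decidable (Spec_ultima_parada combustivel consumo postos_de_gasolina out) := by unfold Spec_ultima_parada; infer_instance

-- ===== CLAIM (what is proved, stated in full; the proofs are below) =====
def Claim_equal_ultima_parada : Prop := ∀ (combustivel : Int) (consumo : Int) (postos_de_gasolina : List Int), Dom_ultima_parada combustivel consumo postos_de_gasolina → Pre_ultima_parada combustivel consumo postos_de_gasolina → Spec_ultima_parada combustivel consumo postos_de_gasolina (ultima_parada combustivel consumo postos_de_gasolina)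
-- ===== LEMMAS AND PROOFS =====

-- binary-search invariant: on a list nondecreasing along indices, if everything left of lo
-- is ≤ a and everything from hi on is > a, the returned index keeps both properties
theorem bs_inv (s : List Int) (a : Int)
    (hmono : ∀ p q (hp : p < s.length) (hq : q < s.length), p ≤ q → s[p] ≤ s[q]) :
    ∀ (lo hi : Nat), lo ≤ hi → hi ≤ s.length →
    (∀ i (h : i < s.length), i < lo → s[i] ≤ a) →
    (∀ i (h : i < s.length), hi ≤ i → a < s[i]) →
    ultima_parada_bs s a lo hi ≤ s.length ∧
    (∀ i (h : i < s.length), i < ultima_parada_bs s a lo hi → s[i] ≤ a) ∧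
    (∀ i (h : i < s.length), ultima_parada_bs s a lo hi ≤ i → a < s[i]) := by
  intro lo hi
  fun_induction ultima_parada_bs s a lo hi with
  | case1 lo hi h mid hle ih =>
    intro _ hhi hlo hup
    have hmiddef : mid = (lo + hi) / 2 := rfl
    clear_value mid
    have hmidlt : mid < s.length := by omega
    have hmid : ((PySem.List.pyGet? s (mid : Int)).getD 0) = s[mid] := by
      simp [PySem.List.pyGet?_natCast, List.getElem?_eq_getElem hmidlt]
    rw [hmid] at hle
    refine ih (by omega) hhi (fun i hi' hlt => le_trans (hmono i mid hi' hmidlt (by omega)) hle) hup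
  | case2 lo hi h mid hgt ih =>
    intro _ hhi hlo hup
    have hmiddef : mid = (lo + hi) / 2 := rfl
    clear_value mid
    have hmidlt : mid < s.length := by omega
    have hmid : ((PySem.List.pyGet? s (mid : Int)).getD 0) = s[mid] := by
      simp [PySem.List.pyGet?_natCast, List.getElem?_eq_getElem hmidlt]
    rw [hmid] at hgt
    refine ih (by omega) (by omega) hlo
      (fun i hi' hge => lt_of_lt_of_le (not_le.mp hgt) (hmono mid i hmidlt hi' hge))
  | case3 lo hi h =>
    intro hlohi hhi hlo hup
    exact ⟨by omega, fun i h' hlt => hlo i h' hlt, fun i h' hge => hup i h' (by omega)⟩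

-- the loop of A from index j returns s[r-1] when j ≤ r < n, where r separates ≤ a from > a
theorem loop_eq (s : List Int) (a : Int) (r : Nat) (posto : Int)
    (hr : r < s.length)
    (hle : ∀ i (h : i < s.length), i < r → s[i] ≤ a)
    (hgt : ∀ i (h : i < s.length), r ≤ i → a < s[i]) :
    ∀ j : Nat, j ≤ r →
    ultima_parada_loop s a (PySem.List.pyRange (j : Int) s.length 1) posto
      = (PySem.List.pyGet? s ((r : Int) - 1)).getD 0 := by
  intro j hj
  induction hk : r - j generalizing j with
  | zero =>
    have hjr : j = r := by omega
    subst hjr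
    rw [PySem.List.pyRange_one_cons (by exact_mod_cast hr)]
    have hcond : ((PySem.List.pyGet? s (j : Int)).getD 0) = s[j] := by
      simp [PySem.List.pyGet?_natCast, List.getElem?_eq_getElem hr]
    simp only [ultima_parada_loop, hcond]
    rw [if_pos (hgt j hr le_rfl)]
  | succ k ih =>
    have hjlt : j < r := by omega
    have hjlen : j < s.length := by omega
    rw [PySem.List.pyRange_one_cons (by exact_mod_cast hjlen)]
    have hcond : ((PySem.List.pyGet? s (j : Int)).getD 0) = s[j] := by
      simp [PySem.List.pyGet?_natCast, List.getElem?_eq_getElem hjlen]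
    simp only [ultima_parada_loop, hcond]
    rw [if_neg (by exact not_lt.mpr (hle j hjlen hjlt))]
    have : ((j : Int) + 1) = ((j + 1 : Nat) : Int) := by push_cast; ring
    rw [this]
    exact ih (j + 1) (by omega) (by omega)

-- ===== VERDICT (by name: the statement is the Claim_ definition above) =====
theorem ultima_parada_spec : Claim_equal_ultima_parada := by
  unfold Claim_equal_ultima_parada
  intro c k ps _ hpre
  unfold Spec_ultima_parada ultima_parada ultima_parada_alt
  simp only []
  set s := PySem.List.sorted ps (fun x => x) false with hsdef
  have hsne : s ≠ [] := by
    rw [hsdef, Ne, PySem.List.sorted_eq_nil_iff _ _ _]; exact hpre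
  set a := c * k with hadef
  set n := s.length with hndef
  have hnpos : 0 < n := by
    rw [hndef]; exact List.length_pos_iff.mpr hsne
  have hmono : ∀ p q (hp : p < s.length) (hq : q < s.length), p ≤ q → s[p] ≤ s[q] := by
    intro p q hp hq hpq
    exact PySem.List.sorted_id_getElem_mono (xs := ps) hpq hq
  obtain ⟨hrle, hP1, hP2⟩ :=
    bs_inv s a hmono 0 n (by omega) (by omega)
      (fun i h hi0 => by omega) (fun i h hni => by omega)
  set r := ultima_parada_bs s a 0 n with hrdef
  have hn1 : n - 1 < s.length := by omega
  have hlast : (PySem.List.pyGet? s (-1)).getD 0 = s[n - 1] := by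
    rw [PySem.List.pyGet?_neg_one, List.getLast?_eq_getElem?]
    rw [← hndef, List.getElem?_eq_getElem hn1]
    rfl
  have h0len : 0 < s.length := by omega
  have hfirst : (PySem.List.pyGet? s 0).getD 0 = s[0] := by
    rw [PySem.List.pyGet?_zero, List.getElem?_eq_getElem h0len]
    rfl
  rw [hlast, hfirst]
  by_cases h1 : s[n - 1] ≤ a
  · -- all elements within reach: r = n, A returns s[n-1]
    have hrn : r = n := by
      by_contra hne
      have hrlt : r < n := by omega
      exact absurd (le_trans (hmono r (n - 1) (by omega) hn1 (by omega)) h1)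
        (not_le.mpr (hP2 r (by omega) le_rfl))
    rw [if_pos h1, hrn, if_pos (by omega : n ≠ 0)]
    have hcast : ((n : Int) - 1) = ((n - 1 : Nat) : Int) := by omega
    rw [hcast, PySem.List.pyGet?_natCast, List.getElem?_eq_getElem hn1]
    rfl
  · rw [if_neg h1]
    by_cases h2 : s[0] > a
    · -- everything out of reach: r = 0, both return -1
      have hr0 : r = 0 := by
        by_contra hne
        exact absurd (hP1 0 h0len (by omega)) (not_le.mpr h2)
      rw [if_pos h2, hr0]
      simp
    · -- mixed case: 1 ≤ r < n, A's scan finds index r, both return s[r-1]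
      rw [if_neg h2]
      have hr1 : 1 ≤ r := by
        by_contra hlt
        exact absurd (hP2 0 h0len (by omega)) (by omega)
      have hrlt : r < n := by
        by_contra hge
        exact absurd (hP1 (n - 1) hn1 (by omega)) h1
      have hloop := loop_eq s a r (-1) (by omega) hP1 hP2 0 (by omega)
      rw [Nat.cast_zero] at hloop
      rw [hloop, if_pos (by omega : r ≠ 0)]
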